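-- pv_equiv track=rewrite | github.com/erichaase/topcoder-python | topcoder/dancing_sentence.py | solution
-- ===== SOURCE A (Python) =====
-- def solution (sentence):
--     out       = ""
--     nextUpper = True
--     for char in sentence:
--         if char == " ":
--             out += char
--             continue
--         if nextUpper:
--             out += char.upper()
--         else:
--             out += char.lower()
--         nextUpper = not nextUpper
--     return out
-- ===== SOURCE B (Python) =====
-- def solution(sentence):
--     pieces = []
--     offset = 0
--     for w in sentence.split(" "):
--         buf = []
--         for i, c in enumerate(w):
--             buf.append(c.upper() if (offset + i) % 2 == 0 else c.lower())
--         pieces.append("".join(buf))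
--         offset += len(w)
--     return " ".join(pieces)
-- ===== Notes on version B (the rewrite author's own statement) =====
-- stated objective: alternative
-- what changed: B splits the sentence on the literal space, transforms each word by index parity against a running letter-count offset, and joins with spaces, replacing A's char-by-char loop with a space special case and a toggling flag.
import Mathlib
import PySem

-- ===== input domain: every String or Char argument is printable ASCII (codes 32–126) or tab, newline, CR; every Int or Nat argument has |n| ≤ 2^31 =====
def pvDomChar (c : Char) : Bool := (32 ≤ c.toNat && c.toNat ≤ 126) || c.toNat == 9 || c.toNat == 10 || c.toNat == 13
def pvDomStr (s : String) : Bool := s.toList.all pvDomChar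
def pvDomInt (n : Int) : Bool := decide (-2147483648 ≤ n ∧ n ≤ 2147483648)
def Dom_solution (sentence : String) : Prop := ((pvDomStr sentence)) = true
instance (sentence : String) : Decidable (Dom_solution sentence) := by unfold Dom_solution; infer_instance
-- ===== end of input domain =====

-- B alternates letter case by word-level parity bookkeeping (split on " " / join) instead of A's
-- char-by-char toggle loop; same cost, different decomposition.

-- ===== PORT A =====
-- A: one pass, a Bool flag toggled on every non-space char; out += char grows a string.
def solution (sentence : String) : String :=
  String.mk
    (sentence.toList.foldl
      (fun (st : List Char × Bool) c =>
        if c = ' ' then (st.1 ++ [c], st.2)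
        else if st.2 then (st.1 ++ [PySem.Chars.upperChar c], false)
        else (st.1 ++ [PySem.Chars.lowerChar c], true))
      ([], true)).1

-- ===== PORT B =====
-- sentence.split(" ") transliterated by hand (sep is the single space char)
def pvSplitSp : List Char → List (List Char)
  | [] => [[]]
  | c :: cs =>
    if c = ' ' then [] :: pvSplitSp cs
    else match pvSplitSp cs with
      | w :: ws => (c :: w) :: ws
      | [] => [[c]]

-- " ".join(pieces) transliterated by hand
def pvJoinSp : List (List Char) → List Char
  | [] => []
  | [w] => w
  | w :: ws => w ++ ' ' :: pvJoinSp ws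

-- the inner per-word loop: char at running index n upper-cased iff n is even
def pvTwWord : List Char → Nat → List Char
  | [], _ => []
  | c :: cs, n =>
    (if n % 2 == 0 then PySem.Chars.upperChar c else PySem.Chars.lowerChar c) :: pvTwWord cs (n + 1)

def solution_alt (sentence : String) : String :=
  String.mk
    (pvJoinSp
      ((pvSplitSp sentence.toList).foldl
        (fun (st : List (List Char) × Nat) w => (st.1 ++ [pvTwWord w st.2], st.2 + w.length))
        ([], 0)).1)

-- ===== PRECONDITION & SPEC =====
def Spec_solution (sentence : String) (out : String) : Prop := out = solution_alt sentence
instance (sentence : String) (out : String) : Decidable (Spec_solution sentence out) := by unfold Spec_solution; infer_instance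

-- ===== CLAIM (what is proved, stated in full; the proofs are below) =====
def Claim_equal_solution : Prop := ∀ (sentence : String), Dom_solution sentence → Spec_solution sentence (solution sentence)

-- ===== LEMMAS AND PROOFS =====

-- common characterisation: alternate case (flag b), spaces kept and flag unchanged
def pvAlt : List Char → Bool → List Char
  | [], _ => []
  | c :: cs, b =>
    if c = ' ' then c :: pvAlt cs b
    else (if b then PySem.Chars.upperChar c else PySem.Chars.lowerChar c) :: pvAlt cs (!b)

theorem solution_foldl (cs : List Char) : ∀ (acc : List Char) (b : Bool),
    (cs.foldl
      (fun (st : List Char × Bool) c =>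
        if c = ' ' then (st.1 ++ [c], st.2)
        else if st.2 then (st.1 ++ [PySem.Chars.upperChar c], false)
        else (st.1 ++ [PySem.Chars.lowerChar c], true))
      (acc, b)).1 = acc ++ pvAlt cs b := by
  induction cs with
  | nil => intro acc b; simp [pvAlt]
  | cons c cs ih =>
    intro acc b
    by_cases hc : c = ' '
    · simp [List.foldl, hc, pvAlt, ih]
    · cases b <;> simp [List.foldl, hc, pvAlt, ih]

-- the B-side word loop, accumulator-free form
def pvMwo : List (List Char) → Nat → List (List Char)
  | [], _ => []
  | w :: ws, n => pvTwWord w n :: pvMwo ws (n + w.length)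

theorem alt_foldl (ws : List (List Char)) : ∀ (acc : List (List Char)) (n : Nat),
    (ws.foldl
      (fun (st : List (List Char) × Nat) w => (st.1 ++ [pvTwWord w st.2], st.2 + w.length))
      (acc, n)).1 = acc ++ pvMwo ws n := by
  induction ws with
  | nil => intro acc n; simp [pvMwo]
  | cons w ws ih => intro acc n; simp [List.foldl, pvMwo, ih]

theorem splitSp_ne_nil (cs : List Char) : pvSplitSp cs ≠ [] := by
  cases cs with
  | nil => simp [pvSplitSp]
  | cons c cs =>
    simp only [pvSplitSp]
    split
    · simp
    · split <;> simp

theorem mwo_ne_nil (ws : List (List Char)) (n : Nat) (h : ws ≠ []) : pvMwo ws n ≠ [] := by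
  cases ws with
  | nil => exact absurd rfl h
  | cons w ws => simp [pvMwo]

theorem joinSp_nil_cons (ws : List (List Char)) (h : ws ≠ []) :
    pvJoinSp ([] :: ws) = ' ' :: pvJoinSp ws := by
  cases ws with
  | nil => exact absurd rfl h
  | cons w ws => simp [pvJoinSp]

theorem joinSp_cons_cons (a : Char) (w : List Char) (ws : List (List Char)) :
    pvJoinSp ((a :: w) :: ws) = a :: pvJoinSp (w :: ws) := by
  cases ws with
  | nil => simp [pvJoinSp]
  | cons v vs => simp [pvJoinSp]

theorem alt_split (cs : List Char) : ∀ (n : Nat),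
    pvJoinSp (pvMwo (pvSplitSp cs) n) = pvAlt cs (n % 2 == 0) := by
  induction cs with
  | nil => intro n; simp [pvSplitSp, pvMwo, pvTwWord, pvJoinSp, pvAlt]
  | cons c cs ih =>
    intro n
    by_cases hc : c = ' '
    · have hne : pvMwo (pvSplitSp cs) n ≠ [] := mwo_ne_nil _ _ (splitSp_ne_nil cs)
      subst hc
      rw [show pvSplitSp (' ' :: cs) = [] :: pvSplitSp cs from by simp [pvSplitSp],
          show pvMwo ([] :: pvSplitSp cs) n = [] :: pvMwo (pvSplitSp cs) n from by
            simp [pvMwo, pvTwWord],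
          joinSp_nil_cons _ hne, ih n]
      simp [pvAlt]
    · obtain ⟨w, ws, heq⟩ : ∃ w ws, pvSplitSp cs = w :: ws := by
        cases h : pvSplitSp cs with
        | nil => exact absurd h (splitSp_ne_nil cs)
        | cons w ws => exact ⟨w, ws, rfl⟩
      have hpar : ((n + 1) % 2 == 0) = !(n % 2 == 0) := by
        rcases Nat.mod_two_eq_zero_or_one n with h | h <;> simp [Nat.add_mod, h]
      have ihx := ih (n + 1)
      rw [heq] at ihx
      rw [show pvSplitSp (c :: cs) = (c :: w) :: ws from by simp [pvSplitSp, hc, heq]]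
      simp only [pvMwo, pvTwWord]
      rw [joinSp_cons_cons]
      have harith : n + (c :: w).length = (n + 1) + w.length := by simp [List.length_cons]; omega
      rw [harith]
      simp only [pvMwo] at ihx
      rw [ihx, pvAlt, if_neg hc, hpar]

-- ===== VERDICT (by name: the statement is the Claim_ definition above) =====
theorem solution_spec : Claim_equal_solution := by
  intro sentence _
  unfold Spec_solution solution solution_alt
  rw [solution_foldl, alt_foldl]
  simp only [List.nil_append]
  rw [alt_split]
  rfl
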